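-- pv_equiv track=rewrite | github.com/tijmen/gpt-neox | tools/datasets/preprocess_data.py | pack_sequences
-- ===== SOURCE A (Python) =====
-- def pack_sequences(sequences, max_seq_length, pad_id, window_size=10):
--     """Pack sequences together to maximize utilization.
--
--     Args:
--         sequences: List of token sequences
--         max_seq_length: Maximum allowed sequence length
--         pad_id: Token ID to use for padding
--         window_size: How far to look ahead for potential matches
--
--     Returns:
--         List of packed sequences, each of length max_seq_length
--     """
--     packed_sequences = []
--     used = set()
--
--     for i in range(len(sequences)):
--         if i in used:
--             continue
--
--         current_seq = sequences[i]
--         used.add(i)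
--
--         # Look ahead up to window_size sequences
--         for j in range(i + 1, min(i + window_size + 1, len(sequences))):
--             if j in used:
--                 continue
--
--             next_seq = sequences[j]
--             # Check if we can fit the next sequence
--             if len(current_seq) + len(next_seq) <= max_seq_length:
--                 current_seq.extend(next_seq)
--                 used.add(j)
--             else:
--                 break
--
--         # Pad to max_seq_length
--         current_seq.extend([pad_id] * (max_seq_length - len(current_seq)))
--         packed_sequences.append(current_seq)
--
--     return packed_sequences
-- ===== SOURCE B (Python) =====
-- def pack_sequences(sequences, max_seq_length, pad_id, window_size=10):
--     """Pack sequences into padded blocks via prefix sums + binary search.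
--
--     Since sequence lengths are non-negative, the prefix sums of lengths are
--     non-decreasing, so A's "break at the first misfit" is the same as "find
--     the largest end e in [i+1, limit] with prefix[e] - prefix[i] <= max_seq_length",
--     which a binary search locates.  Unlike A, B does not mutate the input lists;
--     the return value is identical.
--     """
--     n = len(sequences)
--     prefix = [0]
--     for seq in sequences:
--         prefix.append(prefix[-1] + len(seq))
--     packed = []
--     i = 0
--     while i < n:
--         limit = min(i + window_size + 1, n)
--         key = prefix[i] + max_seq_length
--         # largest e in [i+1, limit] with prefix[e] <= key (default i+1)
--         e, lo, hi = i + 1, i + 2, limit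
--         while lo <= hi:
--             mid = (lo + hi) // 2
--             if prefix[mid] <= key:
--                 e, lo = mid, mid + 1
--             else:
--                 hi = mid - 1
--         block = [tok for seq in sequences[i:e] for tok in seq]
--         block.extend([pad_id] * (max_seq_length - len(block)))
--         packed.append(block)
--         i = e
--     return packed
-- ===== Notes on version B (the rewrite author's own statement) =====
-- stated objective: alternative
-- what changed: B precomputes prefix sums of the sequence lengths and finds each block's end index by binary search over the monotone prefix-sum array (valid because lengths are non-negative, so A's break-at-first-misfit is a threshold on a non-decreasing sequence), then builds each block by slicing and flattening, replacing A's used-set bookkeeping and incremental extend loop; B does not mutate the input lists.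
import Mathlib
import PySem

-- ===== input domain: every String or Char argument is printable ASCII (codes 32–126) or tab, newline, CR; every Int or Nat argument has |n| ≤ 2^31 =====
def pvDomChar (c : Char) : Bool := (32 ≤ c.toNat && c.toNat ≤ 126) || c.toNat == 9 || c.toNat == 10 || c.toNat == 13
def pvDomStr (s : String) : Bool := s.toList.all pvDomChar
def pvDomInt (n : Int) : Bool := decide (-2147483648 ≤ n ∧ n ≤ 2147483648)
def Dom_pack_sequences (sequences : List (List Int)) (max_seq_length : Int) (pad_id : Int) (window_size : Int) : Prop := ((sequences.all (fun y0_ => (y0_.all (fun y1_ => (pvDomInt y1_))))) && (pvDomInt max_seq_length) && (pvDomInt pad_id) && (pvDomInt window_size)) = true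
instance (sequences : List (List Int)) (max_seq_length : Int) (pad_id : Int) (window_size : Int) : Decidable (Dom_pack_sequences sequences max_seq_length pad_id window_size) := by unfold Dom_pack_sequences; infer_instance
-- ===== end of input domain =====

-- B replaces A's greedy extend loop + used-set with prefix sums of the lengths and a binary
-- search for each block's end (valid because lengths are non-negative, so the prefix sums are
-- non-decreasing and A's break-at-first-misfit is a threshold on a monotone sequence).
-- (A mutates the input lists in place, B does not; the equivalence proved is about the return value.)

-- ===== PORT A =====
-- inner 'for j in range(i+1, min(i+window_size+1, len)):' loop with its 'continue'/'break'
def packInnerA (seqs : List (List Int)) (msl : Int) :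
    List Int → List Int → PySem.Set Int → List Int × PySem.Set Int
  | [], cur, used => (cur, used)
  | j :: rest, cur, used =>
    if PySem.Set.contains used j then
      packInnerA seqs msl rest cur used
    else
      let next := (PySem.List.pyGet? seqs j).getD []
      if (cur.length : Int) + (next.length : Int) ≤ msl then
        packInnerA seqs msl rest (cur ++ next) (PySem.Set.add used j)
      else (cur, used)

-- outer 'for i in range(len(sequences)):' loop with the 'if i in used: continue'
def packOuterA (seqs : List (List Int)) (msl pad ws : Int) :
    List Int → List (List Int) → PySem.Set Int → List (List Int)
  | [], packed, _ => packed
  | i :: rest, packed, used =>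
    if PySem.Set.contains used i then
      packOuterA seqs msl pad ws rest packed used
    else
      let cur := (PySem.List.pyGet? seqs i).getD []
      let used1 := PySem.Set.add used i
      let r := packInnerA seqs msl
        (PySem.List.pyRange (i + 1) (min (i + ws + 1) (seqs.length : Int)) 1) cur used1
      packOuterA seqs msl pad ws rest
        (packed ++ [r.1 ++ List.replicate (msl - (r.1.length : Int)).toNat pad]) r.2

def pack_sequences (sequences : List (List Int)) (max_seq_length : Int) (pad_id : Int) (window_size : Int) : List (List Int) :=
  packOuterA sequences max_seq_length pad_id window_size
    (PySem.List.pyRange 0 (sequences.length : Int) 1) [] PySem.Set.empty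

-- ===== PORT B =====
-- 'prefix = [0]; for seq in sequences: prefix.append(prefix[-1] + len(seq))'
def buildPrefix : List (List Int) → List Int → List Int
  | [], P => P
  | s :: rest, P => buildPrefix rest (P ++ [PySem.List.pyGetD P (-1) 0 + (s.length : Int)])

-- 'while lo <= hi: mid = (lo+hi)//2; …' — fuel only makes the loop structurally total
-- (the caller passes the initial interval length, which strictly shrinks each iteration)
def bsearchB (P : List Int) (key : Int) : Nat → Int → Int → Int → Int
  | 0, _, _, e => e
  | fuel + 1, lo, hi, e =>
    if lo ≤ hi then
      let mid := PySem.Int.floordiv (lo + hi) 2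
      if PySem.List.pyGetD P mid 0 ≤ key then bsearchB P key fuel (mid + 1) hi mid
      else bsearchB P key fuel lo (mid - 1) e
    else e

-- 'while i < n:' — fuel n suffices: the pointer advances by ≥ 1 each iteration
def packOuterB (seqs : List (List Int)) (P : List Int) (msl pad ws : Int) :
    Nat → Int → List (List Int)
  | 0, _ => []
  | fuel + 1, i =>
    if i < (seqs.length : Int) then
      let limit := min (i + ws + 1) (seqs.length : Int)
      let key := PySem.List.pyGetD P i 0 + msl
      let e := bsearchB P key (limit - i - 1).toNat (i + 2) limit (i + 1)
      let block := (PySem.List.slice seqs (some i) (some e)).flatMap (fun s => s)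
      (block ++ List.replicate (msl - (block.length : Int)).toNat pad) ::
        packOuterB seqs P msl pad ws fuel e
    else []

def pack_sequences_alt (sequences : List (List Int)) (max_seq_length : Int) (pad_id : Int) (window_size : Int) : List (List Int) :=
  packOuterB sequences (buildPrefix sequences [0]) max_seq_length pad_id window_size
    sequences.length 0

-- ===== PRECONDITION & SPEC =====
def Spec_pack_sequences (sequences : List (List Int)) (max_seq_length : Int) (pad_id : Int) (window_size : Int) (out : List (List Int)) : Prop := out = pack_sequences_alt sequences max_seq_length pad_id window_size
instance (sequences : List (List Int)) (max_seq_length : Int) (pad_id : Int) (window_size : Int) (out : List (List Int)) : Decidable (Spec_pack_sequences sequences max_seq_length pad_id window_size out) := by unfold Spec_pack_sequences; infer_instance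

-- ===== CLAIM (what is proved, stated in full; the proofs are below) =====
def Claim_equal_pack_sequences : Prop := ∀ (sequences : List (List Int)) (max_seq_length : Int) (pad_id : Int) (window_size : Int), Dom_pack_sequences sequences max_seq_length pad_id window_size → Spec_pack_sequences sequences max_seq_length pad_id window_size (pack_sequences sequences max_seq_length pad_id window_size)

-- ===== LEMMAS AND PROOFS =====

-- reference pointer loop (proof helper): A's inner loop with the used-set stripped away
def refInner (seqs : List (List Int)) (msl limit : Int) :
    Nat → Nat → List Int → Nat × List Int
  | 0, j, cur => (j, cur)
  | fuel + 1, j, cur =>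
    if (j : Int) < limit then
      let next := seqs.getD j []
      if (cur.length : Int) + (next.length : Int) ≤ msl then
        refInner seqs msl limit fuel (j + 1) (cur ++ next)
      else (j, cur)
    else (j, cur)

def refOuter (seqs : List (List Int)) (msl pad ws : Int) :
    Nat → Nat → List (List Int)
  | 0, _ => []
  | fuel + 1, i =>
    if i < seqs.length then
      let limit : Int := min ((i : Int) + ws + 1) (seqs.length : Int)
      let r := refInner seqs msl limit seqs.length (i + 1) (seqs.getD i [])
      (r.2 ++ List.replicate (msl - (r.2.length : Int)).toNat pad) ::
        refOuter seqs msl pad ws fuel r.1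
    else []

-- prefix sums of lengths, and the flattened contiguous run
def PSn (seqs : List (List Int)) (k : Nat) : Nat := ((seqs.take k).map List.length).sum
def flatB (seqs : List (List Int)) (a b : Nat) : List Int :=
  ((seqs.drop a).take (b - a)).flatMap (fun s => s)

theorem flat_len (seqs : List (List Int)) (a b : Nat) (h : a ≤ b) :
    PSn seqs b = PSn seqs a + (flatB seqs a b).length := by
  have : b = a + (b - a) := by omega
  rw [PSn, this, List.take_add]
  simp [PSn, flatB]

theorem PSn_mono (seqs : List (List Int)) (a b : Nat) (h : a ≤ b) :
    PSn seqs a ≤ PSn seqs b := by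
  have := flat_len seqs a b h; omega

theorem flatB_succ (seqs : List (List Int)) (a j : Nat) (h1 : a ≤ j) (h2 : j < seqs.length) :
    flatB seqs a j ++ seqs.getD j [] = flatB seqs a (j + 1) := by
  have hd : j - a < (seqs.drop a).length := by simp; omega
  have : j + 1 - a = (j - a) + 1 := by omega
  rw [flatB, flatB, this, List.take_add_one]
  have hja : a + (j - a) = j := by omega
  have : (seqs.drop a)[j - a]? = some (seqs.getD j []) := by
    rw [List.getElem?_drop, hja, List.getD_eq_getElem?_getD,
      List.getElem?_eq_getElem (by omega : j < seqs.length)]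
    simp
  rw [this]
  simp

theorem flatB_one (seqs : List (List Int)) (a : Nat) (h : a < seqs.length) :
    flatB seqs a (a + 1) = seqs.getD a [] := by
  have := flatB_succ seqs a a (by omega) h
  simpa [flatB] using this.symm

theorem PSn_succ (seqs : List (List Int)) (j : Nat) (h : j < seqs.length) :
    PSn seqs (j + 1) = PSn seqs j + (seqs.getD j []).length := by
  have h1 := flat_len seqs j (j+1) (by omega)
  rw [h1, flatB_one seqs j h]

theorem buildPrefix_gen : ∀ (rest pre : List (List Int)),
    buildPrefix rest
        ((List.range (pre.length + 1)).map (fun k => (PSn (pre ++ rest) k : Int))) =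
      (List.range ((pre ++ rest).length + 1)).map (fun k => (PSn (pre ++ rest) k : Int)) := by
  intro rest
  induction rest with
  | nil => intro pre; simp [buildPrefix]
  | cons s rest ih =>
    intro pre
    rw [buildPrefix]
    have hsplit : (List.range (pre.length + 1)).map (fun k => (PSn (pre ++ s :: rest) k : Int)) =
        ((List.range pre.length).map (fun k => (PSn (pre ++ s :: rest) k : Int))) ++
          [(PSn (pre ++ s :: rest) pre.length : Int)] := by
      rw [List.range_succ, List.map_append]; simp
    have hlast : PySem.List.pyGetD
        ((List.range (pre.length + 1)).map (fun k => (PSn (pre ++ s :: rest) k : Int))) (-1) 0 =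
        (PSn (pre ++ s :: rest) pre.length : Int) := by
      rw [hsplit, PySem.List.pyGetD_neg_one_append_singleton]
    have hgetD : (pre ++ s :: rest).getD pre.length [] = s := by
      rw [List.getD_eq_getElem?_getD, List.getElem?_append_right (le_refl _)]
      simp
    have hnext : (PSn (pre ++ s :: rest) pre.length : Int) + (s.length : Int) =
        (PSn (pre ++ s :: rest) (pre.length + 1) : Int) := by
      have := PSn_succ (pre ++ s :: rest) pre.length (by simp)
      rw [this, hgetD]; push_cast; ring
    rw [hlast, hnext]
    have hsplit2 : ((List.range (pre.length + 1)).map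
          (fun k => (PSn (pre ++ s :: rest) k : Int))) ++
          [(PSn (pre ++ s :: rest) (pre.length + 1) : Int)] =
        (List.range (pre.length + 1 + 1)).map (fun k => (PSn (pre ++ s :: rest) k : Int)) := by
      conv_rhs => rw [List.range_succ, List.map_append]
      simp
    rw [hsplit2]
    have hassoc : pre ++ s :: rest = (pre ++ [s]) ++ rest := by simp
    have hlen : pre.length + 1 = (pre ++ [s]).length := by simp
    rw [hassoc, hlen]
    exact ih (pre ++ [s])

-- the Python prefix-building loop produces exactly the prefix sums
theorem buildPrefix_eq (seqs : List (List Int)) :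
    buildPrefix seqs [0] =
      (List.range (seqs.length + 1)).map (fun k => (PSn seqs k : Int)) := by
  have := buildPrefix_gen seqs []
  simpa [PSn] using this

theorem getP (seqs : List (List Int)) (x : Int) (h0 : 0 ≤ x) (h1 : x ≤ (seqs.length : Int)) :
    PySem.List.pyGetD ((List.range (seqs.length + 1)).map (fun k => (PSn seqs k : Int))) x 0 =
      (PSn seqs x.toNat : Int) := by
  have hlen : ((List.range (seqs.length + 1)).map (fun k => (PSn seqs k : Int))).length
      = seqs.length + 1 := by simp
  rw [PySem.List.pyGetD_eq_getElem _ 0 h0 (by rw [hlen]; push_cast; omega)]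
  rw [List.getElem_map, List.getElem_range]

-- binary-search invariant: e is the best index found so far (= max(i+1, lo-1)), everything
-- below lo (and ≥ i+2) is good, everything above hi (and ≤ limit) is bad
theorem bsearch_spec (seqs : List (List Int)) (key i limit : Int) (h0i : 0 ≤ i)
    (hlim : limit ≤ (seqs.length : Int)) :
    ∀ (fuel : Nat) (lo hi e : Int),
      (hi + 1 - lo).toNat ≤ fuel → hi ≤ limit → i + 1 ≤ lo - 1 →
      (lo - 1 = i + 1 ∨ lo - 1 ≤ limit) → e = max (i + 1) (lo - 1) →
      (∀ k : Int, i + 2 ≤ k → k < lo → (PSn seqs k.toNat : Int) ≤ key) →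
      (∀ k : Int, hi < k → k ≤ limit → ¬ ((PSn seqs k.toNat : Int) ≤ key)) →
      ∀ r : Int, r = bsearchB ((List.range (seqs.length + 1)).map (fun k => (PSn seqs k : Int)))
                  key fuel lo hi e →
      i + 1 ≤ r ∧ (r = i + 1 ∨ (r ≤ limit ∧ (PSn seqs r.toNat : Int) ≤ key)) ∧
        (∀ k : Int, r < k → k ≤ limit → ¬ ((PSn seqs k.toNat : Int) ≤ key)) := by
  intro fuel
  induction fuel with
  | zero =>
    intro lo hi e hfuel hhi hlo1 hlo2 hee hlow hhigh r hr
    rw [bsearchB] at hr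
    subst hr hee
    refine ⟨le_max_left _ _, ?_, ?_⟩
    · by_cases hc : lo - 1 = i + 1
      · left; rw [hc]; simp
      · right
        have h2 : i + 2 ≤ lo - 1 := by omega
        have h3 : lo - 1 ≤ limit := by tauto
        have hm : max (i + 1) (lo - 1) = lo - 1 := max_eq_right (by omega)
        rw [hm]
        exact ⟨h3, hlow (lo - 1) h2 (by omega)⟩
    · intro k hk hkl
      have : max (i + 1) (lo - 1) ≥ lo - 1 := le_max_right _ _
      exact hhigh k (by omega) hkl
  | succ fuel ih =>
    intro lo hi e hfuel hhi hlo1 hlo2 hee hlow hhigh r hr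
    simp only [bsearchB] at hr
    by_cases hlh : lo ≤ hi
    · rw [if_pos hlh] at hr
      obtain ⟨hm1, hm2⟩ := PySem.Int.floordiv_two_mid_bounds hlh
      have hgm := getP seqs (PySem.Int.floordiv (lo + hi) 2) (by omega) (by omega)
      rw [hgm] at hr
      by_cases hg : (PSn seqs (PySem.Int.floordiv (lo + hi) 2).toNat : Int) ≤ key
      · rw [if_pos hg] at hr
        refine ih (PySem.Int.floordiv (lo + hi) 2 + 1) hi
          (PySem.Int.floordiv (lo + hi) 2) (by omega) hhi (by omega)
          (Or.inr (by omega)) (by rw [max_eq_right (by omega)]; ring) ?_ hhigh r hr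
        intro k hk2 hklt
        by_cases hko : k < lo
        · exact hlow k hk2 hko
        · have := PSn_mono seqs k.toNat (PySem.Int.floordiv (lo + hi) 2).toNat (by omega)
          omega
      · rw [if_neg hg] at hr
        refine ih lo (PySem.Int.floordiv (lo + hi) 2 - 1) e (by omega) (by omega)
          hlo1 hlo2 hee hlow ?_ r hr
        intro k hk2 hklt
        by_cases hko : hi < k
        · exact hhigh k hko hklt
        · intro habs
          apply hg
          have := PSn_mono seqs (PySem.Int.floordiv (lo + hi) 2).toNat k.toNat (by omega)
          omega
    · rw [if_neg hlh] at hr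
      subst hr hee
      refine ⟨le_max_left _ _, ?_, ?_⟩
      · by_cases hc : lo - 1 = i + 1
        · left; rw [hc]; simp
        · right
          have h2 : i + 2 ≤ lo - 1 := by omega
          have h3 : lo - 1 ≤ limit := by tauto
          have hm : max (i + 1) (lo - 1) = lo - 1 := max_eq_right (by omega)
          rw [hm]
          exact ⟨h3, hlow (lo - 1) h2 (by omega)⟩
      · intro k hk hkl
        have : max (i + 1) (lo - 1) ≥ lo - 1 := le_max_right _ _
        exact hhigh k (by omega) hkl

-- the linear stop of the reference inner loop satisfies the same characterisation
theorem refInner_spec (seqs : List (List Int)) (msl limit : Int) (i : Nat)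
    (hlim : limit ≤ (seqs.length : Int)) :
    ∀ (fuel j : Nat) (cur : List Int),
      i + 1 ≤ j → seqs.length ≤ j + fuel → cur = flatB seqs i j →
      ∀ r : Nat × List Int, r = refInner seqs msl limit fuel j cur →
      r.2 = flatB seqs i r.1 ∧ j ≤ r.1 ∧
        (r.1 = j ∨ (((r.1 : Nat) : Int) ≤ limit ∧
          (PSn seqs r.1 : Int) ≤ (PSn seqs i : Int) + msl)) ∧
        (∀ k : Int, ((r.1 : Nat) : Int) < k → k ≤ limit →
          ¬ ((PSn seqs k.toNat : Int) ≤ (PSn seqs i : Int) + msl)) := by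
  intro fuel
  induction fuel with
  | zero =>
    intro j cur hij hfuel hcur r hr
    rw [refInner] at hr
    subst hr
    refine ⟨hcur, le_refl _, Or.inl rfl, ?_⟩
    intro k hk1 hk2 _
    omega
  | succ fuel ih =>
    intro j cur hij hfuel hcur r hr
    simp only [refInner] at hr
    by_cases hj : (j : Int) < limit
    · rw [if_pos hj] at hr
      have hjn : j < seqs.length := by omega
      have hlen1 := flat_len seqs i j (by omega)
      have hlen2 := PSn_succ seqs j hjn
      by_cases hfit : (cur.length : Int) + ((seqs.getD j []).length : Int) ≤ msl
      · rw [if_pos hfit] at hr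
        have hcur' : cur ++ seqs.getD j [] = flatB seqs i (j + 1) := by
          rw [hcur]; exact flatB_succ seqs i j (by omega) hjn
        obtain ⟨c1, c2, c3, c4⟩ := ih (j + 1) (cur ++ seqs.getD j []) (by omega) (by omega)
          hcur' r hr
        refine ⟨c1, by omega, ?_, c4⟩
        rcases c3 with h | h
        · right
          rw [h]
          constructor
          · push_cast; omega
          · rw [hcur] at hfit
            omega
        · exact Or.inr h
      · rw [if_neg hfit] at hr
        subst hr
        refine ⟨hcur, le_refl _, Or.inl rfl, ?_⟩
        intro k hk1 hk2 habs
        rw [hcur] at hfit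
        have hmono := PSn_mono seqs (j + 1) k.toNat (by omega)
        omega
    · rw [if_neg hj] at hr
      subst hr
      refine ⟨hcur, le_refl _, Or.inl rfl, ?_⟩
      intro k hk1 hk2 _
      omega

-- membership in a used-set of the shape range(0, m)
theorem contains_range (m x : Int) :
    PySem.Set.contains (PySem.List.pyRange 0 m 1) x = decide (0 ≤ x ∧ x < m) := by
  rw [Bool.eq_iff_iff]
  simp [PySem.Set.contains, PySem.List.mem_pyRange_one]

-- adding the next index to a used-set of the shape range(0, m) extends the range
theorem add_range (m : Nat) :
    PySem.Set.add (PySem.List.pyRange 0 (m : Int) 1) (m : Int) =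
      PySem.List.pyRange 0 ((m : Int) + 1) 1 := by
  rw [PySem.Set.add, contains_range]
  simp [PySem.List.pyRange_one_succ_right (by positivity : (0:Int) ≤ (m:Int))]

-- the reference inner loop never moves the pointer backwards
theorem refInner_ge (seqs : List (List Int)) (msl limit : Int) :
    ∀ (fuel j : Nat) (cur : List Int), j ≤ (refInner seqs msl limit fuel j cur).1 := by
  intro fuel
  induction fuel with
  | zero => intro j cur; rw [refInner]
  | succ fuel ih =>
    intro j cur
    rw [refInner]
    by_cases h : (j : Int) < limit
    · rw [if_pos h]
      by_cases hfit : (cur.length : Int) + ((seqs.getD j []).length : Int) ≤ msl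
      · show j ≤ (if (cur.length : Int) + ((seqs.getD j []).length : Int) ≤ msl then
            refInner seqs msl limit fuel (j + 1) (cur ++ seqs.getD j []) else (j, cur)).1
        rw [if_pos hfit]
        exact Nat.le_trans (Nat.le_succ j) (ih (j + 1) (cur ++ seqs.getD j []))
      · show j ≤ (if (cur.length : Int) + ((seqs.getD j []).length : Int) ≤ msl then
            refInner seqs msl limit fuel (j + 1) (cur ++ seqs.getD j []) else (j, cur)).1
        rw [if_neg hfit]
    · rw [if_neg h]

-- A's inner loop, run on range(j, limit) with used = range(0, j), is the reference inner loop
theorem innerAB (seqs : List (List Int)) (msl limit : Int)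
    (_hlim : limit ≤ (seqs.length : Int)) :
    ∀ (fuel j : Nat) (cur : List Int), (limit - (j : Int)).toNat ≤ fuel →
      packInnerA seqs msl (PySem.List.pyRange (j : Int) limit 1) cur
          (PySem.List.pyRange 0 (j : Int) 1) =
        ((refInner seqs msl limit fuel j cur).2,
         PySem.List.pyRange 0 (((refInner seqs msl limit fuel j cur).1 : Nat) : Int) 1) := by
  intro fuel
  induction fuel with
  | zero =>
    intro j cur hf
    have hle : limit ≤ (j : Int) := by omega
    rw [PySem.List.pyRange_one_eq_nil hle, packInnerA, refInner]
  | succ fuel ih =>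
    intro j cur hf
    by_cases h : (j : Int) < limit
    · rw [PySem.List.pyRange_one_cons h, packInnerA, contains_range]
      have hget : (PySem.List.pyGet? seqs (j : Int)).getD [] = seqs.getD j [] := by
        simp [PySem.List.pyGet?_natCast, List.getD_eq_getElem?_getD]
      simp only [show decide (0 ≤ (j:Int) ∧ (j:Int) < (j:Int)) = false by simp, Bool.false_eq_true,
        if_false, hget]
      rw [refInner, if_pos h]
      by_cases hfit : (cur.length : Int) + ((seqs.getD j []).length : Int) ≤ msl
      · rw [if_pos hfit, add_range j]
        have hc : ((j:Int) + 1) = ((j + 1 : Nat) : Int) := by push_cast; ring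
        rw [hc]
        rw [ih (j + 1) (cur ++ seqs.getD j []) (by omega)]
        show _ = ((if (cur.length : Int) + ((seqs.getD j []).length : Int) ≤ msl then
            refInner seqs msl limit fuel (j + 1) (cur ++ seqs.getD j []) else (j, cur)).2, _)
        rw [if_pos hfit]
      · rw [if_neg hfit]
        show _ = ((if (cur.length : Int) + ((seqs.getD j []).length : Int) ≤ msl then
            refInner seqs msl limit fuel (j + 1) (cur ++ seqs.getD j []) else (j, cur)).2, _)
        rw [if_neg hfit]
    · rw [PySem.List.pyRange_one_eq_nil (by omega), packInnerA, refInner, if_neg h]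

-- A's outer loop, continued from index list range(i, n) with used = range(0, m), i ≤ m, is refOuter from pointer m
theorem outerAB (seqs : List (List Int)) (msl pad ws : Int) :
    ∀ (d i m : Nat) (packed : List (List Int)) (fuel : Nat),
      seqs.length ≤ i + d → i ≤ m → seqs.length ≤ m + fuel →
      packOuterA seqs msl pad ws (PySem.List.pyRange (i : Int) (seqs.length : Int) 1) packed
          (PySem.List.pyRange 0 (m : Int) 1) =
        packed ++ refOuter seqs msl pad ws fuel m := by
  intro d
  induction d with
  | zero =>
    intro i m packed fuel hlen him hfuel
    rw [PySem.List.pyRange_one_eq_nil (by exact_mod_cast (by omega : seqs.length ≤ i))]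
    rw [packOuterA]
    cases fuel with
    | zero => rw [refOuter]; simp
    | succ fuel => rw [refOuter, if_neg (by omega)]; simp
  | succ d ih =>
    intro i m packed fuel hlen him hfuel
    by_cases hi : i < seqs.length
    · rw [PySem.List.pyRange_one_cons (by exact_mod_cast hi)]
      rw [packOuterA, contains_range]
      have hc1 : ((i:Int) + 1) = ((i + 1 : Nat) : Int) := by push_cast; ring
      by_cases hm : i < m
      · rw [if_pos (by simp; exact_mod_cast hm)]
        rw [hc1]
        exact ih (i + 1) m packed fuel (by omega) (by omega) (by omega)
      · have hmi : m = i := by omega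
        subst hmi
        rw [if_neg (by simp)]
        have hget : (PySem.List.pyGet? seqs (m : Int)).getD [] = seqs.getD m [] := by
          simp [PySem.List.pyGet?_natCast, List.getD_eq_getElem?_getD]
        simp only [hget]
        rw [add_range m, hc1]
        have hlim : min ((m:Int) + ws + 1) (seqs.length : Int) ≤ (seqs.length : Int) :=
          min_le_right _ _
        rw [innerAB seqs msl (min ((m:Int) + ws + 1) (seqs.length : Int)) hlim
          seqs.length (m + 1) (seqs.getD m []) (by omega)]
        obtain ⟨fuel, rfl⟩ : ∃ f, fuel = f + 1 := by
          cases fuel with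
          | zero => omega
          | succ f => exact ⟨f, rfl⟩
        rw [ih (m + 1)
          (refInner seqs msl (min ((m:Int) + ws + 1) (seqs.length : Int)) seqs.length (m + 1) (seqs.getD m [])).1
          _ fuel (by omega)
          (refInner_ge _ _ _ _ _ _)
          (by have := refInner_ge seqs msl (min ((m:Int) + ws + 1) (seqs.length : Int)) seqs.length (m + 1) (seqs.getD m []); omega)]
        conv_rhs => rw [refOuter, if_pos hi]
        simp
    · rw [PySem.List.pyRange_one_eq_nil (by exact_mod_cast (by omega : seqs.length ≤ i))]
      rw [packOuterA]
      cases fuel with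
      | zero => rw [refOuter]; simp
      | succ fuel => rw [refOuter, if_neg (by omega)]; simp

-- the two stop indices agree: the binary search finds exactly the linear loop's stop
theorem stop_eq (seqs : List (List Int)) (msl ws : Int) (i : Nat) (hi : i < seqs.length) :
    bsearchB ((List.range (seqs.length + 1)).map (fun k => (PSn seqs k : Int)))
        ((PSn seqs i : Int) + msl)
        (min ((i:Int) + ws + 1) (seqs.length : Int) - (i:Int) - 1).toNat
        ((i:Int) + 2) (min ((i:Int) + ws + 1) (seqs.length : Int)) ((i:Int) + 1) =
      (((refInner seqs msl (min ((i:Int) + ws + 1) (seqs.length : Int)) seqs.length (i+1)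
          (seqs.getD i [])).1 : Nat) : Int) := by
  have hlim : min ((i:Int) + ws + 1) (seqs.length : Int) ≤ (seqs.length : Int) :=
    min_le_right _ _
  obtain ⟨c1, c2, c3, c4⟩ := refInner_spec seqs msl
    (min ((i:Int) + ws + 1) (seqs.length : Int)) i hlim
    seqs.length (i+1) (seqs.getD i []) (le_refl _) (by omega) (flatB_one seqs i hi).symm
    (refInner seqs msl (min ((i:Int) + ws + 1) (seqs.length : Int)) seqs.length (i+1)
      (seqs.getD i [])) rfl
  obtain ⟨b1, b2, b3⟩ := bsearch_spec seqs ((PSn seqs i : Int) + msl) (i:Int)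
    (min ((i:Int) + ws + 1) (seqs.length : Int)) (by positivity) hlim
    (min ((i:Int) + ws + 1) (seqs.length : Int) - (i:Int) - 1).toNat ((i:Int) + 2)
    (min ((i:Int) + ws + 1) (seqs.length : Int)) ((i:Int) + 1)
    (by omega) (le_refl _) (by omega) (Or.inl (by ring))
    (by rw [show (i:Int) + 2 - 1 = (i:Int) + 1 by ring, max_self])
    (by intro k h1 h2; omega) (by intro k h1 h2 _; omega)
    (bsearchB ((List.range (seqs.length + 1)).map (fun k => (PSn seqs k : Int)))
      ((PSn seqs i : Int) + msl)
      (min ((i:Int) + ws + 1) (seqs.length : Int) - (i:Int) - 1).toNat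
      ((i:Int) + 2) (min ((i:Int) + ws + 1) (seqs.length : Int)) ((i:Int) + 1)) rfl
  set EE := bsearchB ((List.range (seqs.length + 1)).map (fun k => (PSn seqs k : Int)))
      ((PSn seqs i : Int) + msl)
      (min ((i:Int) + ws + 1) (seqs.length : Int) - (i:Int) - 1).toNat
      ((i:Int) + 2) (min ((i:Int) + ws + 1) (seqs.length : Int)) ((i:Int) + 1) with hEE
  set RR := refInner seqs msl (min ((i:Int) + ws + 1) (seqs.length : Int)) seqs.length (i+1)
      (seqs.getD i []) with hRR
  rcases lt_trichotomy EE ((RR.1 : Nat) : Int) with h | h | h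
  · rcases c3 with hc | ⟨hc1, hc2⟩
    · omega
    · have := b3 ((RR.1 : Nat) : Int) h hc1
      rw [Int.toNat_natCast] at this
      exact absurd hc2 this
  · exact h
  · rcases b2 with hb | ⟨hb1, hb2⟩
    · omega
    · exact absurd hb2 (c4 EE h hb1)

-- the reference inner loop's accumulated block is the flattened consumed run
theorem run_eq (seqs : List (List Int)) (msl ws : Int) (i : Nat) (hi : i < seqs.length) :
    (refInner seqs msl (min ((i:Int) + ws + 1) (seqs.length : Int)) seqs.length (i+1)
        (seqs.getD i [])).2 =
      flatB seqs i (refInner seqs msl (min ((i:Int) + ws + 1) (seqs.length : Int))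
        seqs.length (i+1) (seqs.getD i [])).1 := by
  have hlim : min ((i:Int) + ws + 1) (seqs.length : Int) ≤ (seqs.length : Int) :=
    min_le_right _ _
  obtain ⟨c1, _, _, _⟩ := refInner_spec seqs msl
    (min ((i:Int) + ws + 1) (seqs.length : Int)) i hlim
    seqs.length (i+1) (seqs.getD i []) (le_refl _) (by omega) (flatB_one seqs i hi).symm
    (refInner seqs msl (min ((i:Int) + ws + 1) (seqs.length : Int)) seqs.length (i+1)
      (seqs.getD i [])) rfl
  exact c1

-- the reference pointer loop equals B's binary-search loop
theorem outerRB (seqs : List (List Int)) (msl pad ws : Int) :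
    ∀ (fuel : Nat) (i : Nat),
      refOuter seqs msl pad ws fuel i =
        packOuterB seqs ((List.range (seqs.length + 1)).map (fun k => (PSn seqs k : Int)))
          msl pad ws fuel (i : Int) := by
  intro fuel
  induction fuel with
  | zero => intro i; rw [refOuter, packOuterB]
  | succ fuel ih =>
    intro i
    by_cases hi : i < seqs.length
    · have hiI : (i : Int) < (seqs.length : Int) := by exact_mod_cast hi
      simp only [refOuter, packOuterB]
      rw [if_pos hi, if_pos hiI]
      rw [getP seqs (i : Int) (by positivity) (by omega)]
      rw [Int.toNat_natCast]
      rw [stop_eq seqs msl ws i hi]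
      rw [PySem.List.slice_natCast]
      rw [run_eq seqs msl ws i hi]
      rw [← ih]
      rfl
    · have hiI : ¬ ((i : Int) < (seqs.length : Int)) := by exact_mod_cast hi
      simp only [refOuter, packOuterB]
      rw [if_neg hi, if_neg hiI]

-- ===== VERDICT (by name: the statement is the Claim_ definition above) =====
theorem pack_sequences_spec : Claim_equal_pack_sequences := by
  intro seqs msl pad ws _
  unfold Spec_pack_sequences pack_sequences pack_sequences_alt
  have h := outerAB seqs msl pad ws seqs.length 0 0 [] seqs.length (by omega) (by omega) (by omega)
  rw [buildPrefix_eq]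
  have h2 := outerRB seqs msl pad ws seqs.length 0
  simpa [PySem.Set.empty, h2] using h
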